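-- pv_equiv track=rewrite | github.com/SavelichevB/WaveChat | Backend/config.py | ValidationData
-- ===== SOURCE A (Python) =====
-- def ValidationData(type, data):
--
--  forbidden_symbols = [
--        '<', '>', '&', "'", '"', ';', '--', '=',
--        '/*', '*/', '@@', 'xp_', 'sp_',
--        'javascript:', 'onclick=', 'onload=',
--        'union select', 'drop table', 'insert into'
--    ]
--
--  for item in data:
--      if isinstance(item, str):
--          for symbol in forbidden_symbols:
--              if symbol in item:
--                  return False
--
--  if int(type) == 1: # USERNAME VALIDATION --
--     for item in data:
--       if isinstance(item, str):
--         if len(item) < 3 or len(item) > 100: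
--           return False
--     return True
--  elif int(type) == 2: # PASSWORD VALIDATION --
--     for item in data:
--       if isinstance(item, str):
--         if len(item) < 8 or len(item) > 100:
--           return False
--     return True
--  elif int(type) == 3: # EMAIL VALIDATION --
--     for item in data:
--       if isinstance(item, str):
--         if len(item) < 3 or len(item) > 100:
--           return False
--         parts = item.split('@')
--         if len(parts) != 2:
--           return False
--     return True
--  elif int(type) == 4: # OTHER VALIDATION --
--     for item in data:
--       if isinstance(item, str):
--         if len(item) < 8 or len(item) > 300:
--           return False
--     return True
--  elif int(type) == 5: # OTHER VALIDATION --
--     for item in data: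
--       if isinstance(item, str):
--         if len(item) < 3 or len(item) > 400:
--           return False
--     return True
--  else: # OTHER VALIDATION --
--     for item in data:
--       if isinstance(item, str):
--         if len(item) < 3 or len(item) > 1000:
--           return False
--     return True
-- ===== SOURCE B (Python) =====
-- def ValidationData(type, data):
--
--     forbidden_symbols = [
--         '<', '>', '&', "'", '"', ';', '--', '=',
--         '/*', '*/', '@@', 'xp_', 'sp_',
--         'javascript:', 'onclick=', 'onload=',
--         'union select', 'drop table', 'insert into'
--     ]
--
--     t = int(type)
--     lo, hi = {1: (3, 100), 2: (8, 100), 3: (3, 100),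
--               4: (8, 300), 5: (3, 400)}.get(t, (3, 1000))
--
--     for item in data:
--         if not isinstance(item, str):
--             continue
--         if any(symbol in item for symbol in forbidden_symbols):
--             return False
--         if not (lo <= len(item) <= hi):
--             return False
--         if t == 3 and len(item.split('@')) != 2:
--             return False
--     return True
-- ===== Notes on version B (the rewrite author's own statement) =====
-- stated objective: simpler
-- what changed: B replaces A's six copy-pasted per-type length loops (preceded by a separate full forbidden-substring pass) by a single (lo,hi) dict lookup with default (3,1000) and ONE fused pass over data that checks forbidden substrings, the length bounds and (for type 3) the '@'-split per item.
import Mathlib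
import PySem

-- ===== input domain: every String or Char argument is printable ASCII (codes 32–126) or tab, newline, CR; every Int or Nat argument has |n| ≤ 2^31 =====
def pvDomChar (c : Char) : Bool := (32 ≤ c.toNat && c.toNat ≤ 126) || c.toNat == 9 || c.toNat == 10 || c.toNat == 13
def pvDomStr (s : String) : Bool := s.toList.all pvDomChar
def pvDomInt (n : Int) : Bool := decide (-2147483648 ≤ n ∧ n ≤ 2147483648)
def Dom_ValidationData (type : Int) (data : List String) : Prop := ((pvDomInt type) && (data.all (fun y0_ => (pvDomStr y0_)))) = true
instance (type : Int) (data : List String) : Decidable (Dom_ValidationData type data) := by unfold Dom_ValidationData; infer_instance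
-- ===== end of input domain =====

-- B replaces A's six per-type length loops by one (lo,hi) dict lookup and a single pass over data (simpler decomposition, same cost).

-- the forbidden-substring literal list (identical in both Pythons)
def forbiddenSymbols : List String :=
  ["<", ">", "&", "'", "\"", ";", "--", "=",
   "/*", "*/", "@@", "xp_", "sp_",
   "javascript:", "onclick=", "onload=",
   "union select", "drop table", "insert into"]

-- ===== PORT A =====
-- A: one loop over all items returning False on any forbidden substring; then int(type) (identity
-- on Int) selects one of six per-type length loops; type 3 additionally requires the '@'-split to
-- have exactly 2 parts.  item.split('@') is ported as (PySem.Str.split? item "@").getD [] — the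
-- separator "@" is nonempty, so split? is always some (exact).
def ValidationData (type : Int) (data : List String) : Bool :=
  if data.any (fun item => forbiddenSymbols.any (fun symbol => PySem.Str.isIn symbol item)) then
    false
  else if type = 1 then
    data.all (fun item => !(PySem.Str.len item < 3 || PySem.Str.len item > 100))
  else if type = 2 then
    data.all (fun item => !(PySem.Str.len item < 8 || PySem.Str.len item > 100))
  else if type = 3 then
    data.all (fun item =>
      !(PySem.Str.len item < 3 || PySem.Str.len item > 100) &&
      (((PySem.Str.split? item "@").getD []).length == 2))
  else if type = 4 then
    data.all (fun item => !(PySem.Str.len item < 8 || PySem.Str.len item > 300))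
  else if type = 5 then
    data.all (fun item => !(PySem.Str.len item < 3 || PySem.Str.len item > 400))
  else
    data.all (fun item => !(PySem.Str.len item < 3 || PySem.Str.len item > 1000))

-- ===== PORT B =====
-- B: (lo, hi) = {1:(3,100),2:(8,100),3:(3,100),4:(8,300),5:(3,400)}.get(int(type), (3,1000)),
-- then a SINGLE pass over data checking forbidden substrings, lo ≤ len ≤ hi, and (only when
-- t == 3) the '@'-split length, per item.  split ported as in A.
def pyBounds (t : Int) : Int × Int :=
  (PySem.Dict.ofList [((1 : Int), ((3 : Int), (100 : Int))), (2, (8, 100)), (3, (3, 100)),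
                      (4, (8, 300)), (5, (3, 400))]).getD t (3, 1000)

def ValidationData_alt (type : Int) (data : List String) : Bool :=
  data.all (fun item =>
    (!forbiddenSymbols.any (fun symbol => PySem.Str.isIn symbol item)) &&
    ((pyBounds type).1 ≤ PySem.Str.len item && PySem.Str.len item ≤ (pyBounds type).2) &&
    (!(decide (type = 3)) || (((PySem.Str.split? item "@").getD []).length == 2)))

-- ===== PRECONDITION & SPEC =====
def Spec_ValidationData (type : Int) (data : List String) (out : Bool) : Prop := out = ValidationData_alt type data
instance (type : Int) (data : List String) (out : Bool) : Decidable (Spec_ValidationData type data out) := by unfold Spec_ValidationData; infer_instance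

-- ===== CLAIM (what is proved, stated in full; the proofs are below) =====
def Claim_equal_ValidationData : Prop := ∀ (type : Int) (data : List String), Dom_ValidationData type data → Spec_ValidationData type data (ValidationData type data)

-- ===== LEMMAS AND PROOFS =====

-- A's two passes (forbidden scan, then one per-type loop with body p) equal B's single pass with
-- body r whenever r i = !g i && p i pointwise (both sides are just the conjunction of all checks).
theorem two_pass_eq (g p r : String → Bool) (data : List String)
    (h : ∀ i, r i = (!g i && p i)) :
    (if data.any g then false else data.all p) = data.all r := by
  induction data with
  | nil => simp
  | cons x xs ih =>
    by_cases hx : g x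
    · simp only [List.any_cons, hx, Bool.true_or, if_true, List.all_cons, h x, Bool.not_true,
        Bool.false_and]
    · by_cases hxs : xs.any g
      · simp only [hxs, if_true] at ih
        simp only [List.any_cons, hx, Bool.false_or, hxs, if_true, List.all_cons, h x, ← ih,
          Bool.and_false]
      · simp only [hxs, if_false, Bool.false_eq_true] at ih
        simp only [List.any_cons, hx, Bool.false_or, hxs, Bool.false_eq_true, if_false,
          List.all_cons, h x, ih, Bool.not_false, Bool.true_and]

-- per-item agreement of the length checks (no email clause)
theorem item_eq_plain (t lo hi : Int) (ht : ¬ t = 3) (i : String) :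
    ((!forbiddenSymbols.any (fun symbol => PySem.Str.isIn symbol i)) &&
      (lo ≤ PySem.Str.len i && PySem.Str.len i ≤ hi) &&
      (!(decide (t = 3)) || (((PySem.Str.split? i "@").getD []).length == 2))) =
    ((!forbiddenSymbols.any (fun symbol => PySem.Str.isIn symbol i)) &&
      !(PySem.Str.len i < lo || PySem.Str.len i > hi)) := by
  cases hg : forbiddenSymbols.any (fun symbol => PySem.Str.isIn symbol i)
  · simp only [Bool.not_false, Bool.true_and, show (decide (t = 3)) = false from by simp [ht],
      Bool.true_or, Bool.and_true]
    rw [Bool.eq_iff_iff]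
    simp only [Bool.and_eq_true, Bool.not_eq_true', Bool.or_eq_false_iff, decide_eq_true_eq,
      decide_eq_false_iff_not]
    omega
  · simp only [Bool.not_true, Bool.false_and]

-- per-item agreement for the email case t = 3
theorem item_eq_email (i : String) :
    ((!forbiddenSymbols.any (fun symbol => PySem.Str.isIn symbol i)) &&
      ((3 : Int) ≤ PySem.Str.len i && PySem.Str.len i ≤ (100 : Int)) &&
      (!(decide ((3 : Int) = 3)) || (((PySem.Str.split? i "@").getD []).length == 2))) =
    ((!forbiddenSymbols.any (fun symbol => PySem.Str.isIn symbol i)) &&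
      (!(PySem.Str.len i < 3 || PySem.Str.len i > 100) &&
        (((PySem.Str.split? i "@").getD []).length == 2))) := by
  cases hg : forbiddenSymbols.any (fun symbol => PySem.Str.isIn symbol i)
  · simp only [Bool.not_false, Bool.true_and, decide_true, Bool.not_true, Bool.false_or]
    cases hs : (((PySem.Str.split? i "@").getD []).length == 2)
    · simp only [Bool.and_false]
    · simp only [Bool.and_true]
      rw [Bool.eq_iff_iff]
      simp only [Bool.and_eq_true, Bool.not_eq_true', Bool.or_eq_false_iff, decide_eq_true_eq,
        decide_eq_false_iff_not]
      omega
  · simp only [Bool.not_true, Bool.false_and]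

theorem ValidationData_spec : Claim_equal_ValidationData := by
  intro type data _
  unfold Spec_ValidationData ValidationData ValidationData_alt
  by_cases h1 : type = 1
  · subst h1
    rw [if_pos rfl, show pyBounds 1 = ((3 : Int), (100 : Int)) from by decide]
    exact two_pass_eq _ _ _ data (fun i => item_eq_plain 1 3 100 (by norm_num) i)
  · rw [if_neg h1]
    by_cases h2 : type = 2
    · subst h2
      rw [if_pos rfl, show pyBounds 2 = ((8 : Int), (100 : Int)) from by decide]
      exact two_pass_eq _ _ _ data (fun i => item_eq_plain 2 8 100 (by norm_num) i)
    · rw [if_neg h2]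
      by_cases h3 : type = 3
      · subst h3
        rw [if_pos rfl, show pyBounds 3 = ((3 : Int), (100 : Int)) from by decide]
        exact two_pass_eq _ _ _ data (fun i => item_eq_email i)
      · rw [if_neg h3]
        by_cases h4 : type = 4
        · subst h4
          rw [if_pos rfl, show pyBounds 4 = ((8 : Int), (300 : Int)) from by decide]
          exact two_pass_eq _ _ _ data (fun i => item_eq_plain 4 8 300 (by norm_num) i)
        · rw [if_neg h4]
          by_cases h5 : type = 5
          · subst h5
            rw [if_pos rfl, show pyBounds 5 = ((3 : Int), (400 : Int)) from by decide]
            exact two_pass_eq _ _ _ data (fun i => item_eq_plain 5 3 400 (by norm_num) i)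
          · rw [if_neg h5]
            have e1 : ((1 : Int) == type) = false := by simp [Ne.symm h1]
            have e2 : ((2 : Int) == type) = false := by simp [Ne.symm h2]
            have e3 : ((3 : Int) == type) = false := by simp [Ne.symm h3]
            have e4 : ((4 : Int) == type) = false := by simp [Ne.symm h4]
            have e5 : ((5 : Int) == type) = false := by simp [Ne.symm h5]
            rw [show pyBounds type = ((3 : Int), (1000 : Int)) from by
              simp [pyBounds, PySem.Dict.ofList, PySem.Dict.update, PySem.Dict.insert,
                PySem.Dict.getD, PySem.Dict.get?, PySem.Dict.empty, List.find?, e1, e2, e3, e4, e5]]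
            exact two_pass_eq _ _ _ data (fun i => item_eq_plain type 3 1000 h3 i)
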